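-- pv_equiv track=rewrite | github.com/azizalibasic/RL | hws/hw4/hw4.py | state_to_r_c
-- ===== SOURCE A (Python) =====
-- def state_to_r_c(S, grid):
--     sqr = len(grid)
--     cnt = 0
--     for r in range(sqr):
--         for c in range(sqr):
--             if cnt == S:
--                 return (r,c)
--             cnt+=1
-- ===== SOURCE B (Python) =====
-- def state_to_r_c(S, grid):
--     n = len(grid)
--     if 0 <= S < n * n:
--         return divmod(S, n)
--     return None
-- ===== Notes on version B (the rewrite author's own statement) =====
-- stated objective: faster
-- what changed: Replaced the nested counting loops over the whole grid with a constant-time divmod(S, len(grid)) guarded by a range check.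
import Mathlib
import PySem

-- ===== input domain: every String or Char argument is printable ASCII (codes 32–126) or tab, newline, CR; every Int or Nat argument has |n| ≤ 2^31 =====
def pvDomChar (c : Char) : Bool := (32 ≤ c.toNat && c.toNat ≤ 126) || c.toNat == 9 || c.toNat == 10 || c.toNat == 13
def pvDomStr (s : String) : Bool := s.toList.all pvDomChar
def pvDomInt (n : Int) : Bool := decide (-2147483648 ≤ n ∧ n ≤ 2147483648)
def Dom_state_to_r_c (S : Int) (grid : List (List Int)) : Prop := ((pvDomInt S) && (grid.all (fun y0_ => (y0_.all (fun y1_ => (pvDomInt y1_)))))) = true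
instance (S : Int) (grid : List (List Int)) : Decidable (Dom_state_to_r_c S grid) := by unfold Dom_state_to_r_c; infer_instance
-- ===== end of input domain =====

-- B replaces A's nested counting loops over the whole grid by a single guarded divmod (objective: faster).

-- ===== PORT A =====
-- inner loop `for c in range(sqr)`: returns (early-return result, updated cnt)
def pvAInner (S : Int) (r : Int) : List Int → Int → Option (Int × Int) × Int
  | [], cnt => (none, cnt)
  | c :: rest, cnt =>
    if cnt = S then (some (r, c), cnt) else pvAInner S r rest (cnt + 1)

-- outer loop `for r in range(sqr)`
def pvAOuter (S : Int) (sqr : Int) : List Int → Int → Option (Int × Int)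
  | [], _ => none
  | r :: rest, cnt =>
    match pvAInner S r (PySem.List.pyRange 0 sqr 1) cnt with
    | (some p, _) => some p
    | (none, cnt') => pvAOuter S sqr rest cnt'

def state_to_r_c (S : Int) (grid : List (List Int)) : Option (Int × Int) :=
  let sqr : Int := grid.length
  pvAOuter S sqr (PySem.List.pyRange 0 sqr 1) 0

-- ===== PORT B =====
def state_to_r_c_alt (S : Int) (grid : List (List Int)) : Option (Int × Int) :=
  let n : Int := grid.length
  if 0 ≤ S ∧ S < n * n then some (PySem.Int.floordiv S n, PySem.Int.mod S n) else none

-- ===== PRECONDITION & SPEC =====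
def Spec_state_to_r_c (S : Int) (grid : List (List Int)) (out : Option (Int × Int)) : Prop := out = state_to_r_c_alt S grid
instance (S : Int) (grid : List (List Int)) (out : Option (Int × Int)) : Decidable (Spec_state_to_r_c S grid out) := by unfold Spec_state_to_r_c; infer_instance

-- ===== CLAIM (what is proved, stated in full; the proofs are below) =====
def Claim_equal_state_to_r_c : Prop := ∀ (S : Int) (grid : List (List Int)), Dom_state_to_r_c S grid → Spec_state_to_r_c S grid (state_to_r_c S grid)

-- ===== LEMMAS AND PROOFS =====


theorem pvAInner_eq (S r : Int) : ∀ (m : Nat) (a cnt : Int),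
    pvAInner S r ((List.range m).map (fun k : Nat => a + (k : Int))) cnt =
      if cnt ≤ S ∧ S < cnt + m then (some (r, a + (S - cnt)), S)
      else (none, cnt + m) := by
  intro m
  induction m with
  | zero =>
    intro a cnt
    simp [pvAInner]
  | succ m ih =>
    intro a cnt
    rw [List.range_succ_eq_map]
    simp only [List.map_cons, List.map_map, pvAInner]
    by_cases h : cnt = S
    · rw [if_pos h]
      rw [if_pos (by omega)]
      subst h
      simp
    · rw [if_neg h]
      have h2 : ((List.range m).map ((fun k : Nat => a + (k : Int)) ∘ Nat.succ)) =
          ((List.range m).map (fun k : Nat => (a + 1) + (k : Int))) := by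
        apply List.map_congr_left; intro k _
        simp [Function.comp, Nat.succ_eq_add_one]; ring
      rw [h2, ih (a + 1) (cnt + 1)]
      by_cases hc : cnt + 1 ≤ S ∧ S < cnt + 1 + m
      · rw [if_pos hc, if_pos (by omega)]
        have : a + 1 + (S - (cnt + 1)) = a + (S - cnt) := by ring
        rw [this]
      · rw [if_neg hc, if_neg (by push_cast; omega)]
        have : cnt + 1 + (m : Int) = cnt + ((m : Int) + 1) := by ring
        rw [this]; push_cast; ring_nf


theorem pvAOuter_eq (S sqr : Int) (hs : 0 ≤ sqr) : ∀ (m : Nat) (r0 cnt : Int),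
    pvAOuter S sqr ((List.range m).map (fun k : Nat => r0 + (k : Int))) cnt =
      if cnt ≤ S ∧ S < cnt + m * sqr
      then some (r0 + (S - cnt) / sqr, (S - cnt) % sqr)
      else none := by
  intro m
  induction m with
  | zero =>
    intro r0 cnt
    simp [pvAOuter]
  | succ m ih =>
    intro r0 cnt
    rw [List.range_succ_eq_map]
    simp only [List.map_cons, List.map_map, pvAOuter]
    rw [PySem.List.pyRange_one, pvAInner_eq]
    have hsq : ((sqr - 0).toNat : Int) = sqr := by omega
    by_cases hhit : cnt ≤ S ∧ S < cnt + ((sqr - 0).toNat : Int)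
    · rw [if_pos hhit]
      rw [if_pos (show cnt ≤ S ∧ S < cnt + ((m:Nat)+1 : Nat) * sqr by
        push_cast; constructor
        · exact hhit.1
        · nlinarith [hhit.2, hsq, (Nat.cast_nonneg m : (0:Int) ≤ m), hs])]
      have h1 : (S - cnt) / sqr = 0 := Int.ediv_eq_zero_of_lt (by omega) (by omega)
      have h2 : (S - cnt) % sqr = S - cnt := Int.emod_eq_of_lt (by omega) (by omega)
      rw [h1, h2]
      simp
    · rw [if_neg hhit]
      have h2 : ((List.range m).map ((fun k : Nat => r0 + (k : Int)) ∘ Nat.succ)) =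
          ((List.range m).map (fun k : Nat => (r0 + 1) + (k : Int))) := by
        apply List.map_congr_left; intro k _
        simp [Function.comp, Nat.succ_eq_add_one]; ring
      dsimp only
      rw [h2, ih (r0 + 1) (cnt + ((sqr - 0).toNat : Int))]
      by_cases hS : S < cnt
      · rw [if_neg (by rintro ⟨h1, _⟩; omega), if_neg (by rintro ⟨h1, _⟩; omega)]
      · have hle : cnt + sqr ≤ S := by omega
        by_cases hc : cnt + ((sqr - 0).toNat : Int) ≤ S ∧ S < cnt + ((sqr - 0).toNat : Int) + m * sqr
        · rw [if_pos hc, if_pos (by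
            push_cast
            constructor
            · omega
            · nlinarith [hc.2, hsq])]
          have hpos : 0 < sqr := by
            by_contra hz
            have hz0 : sqr = 0 := by omega
            rw [hz0] at hc
            simp at hc
            omega
          have key : S - cnt = (S - (cnt + ((sqr - 0).toNat : Int))) + 1 * sqr := by omega
          rw [key, Int.add_mul_ediv_right _ _ (by omega : sqr ≠ 0), Int.add_mul_emod_self_right]
          have : r0 + 1 + (S - (cnt + ((sqr-0).toNat : Int))) / sqr = r0 + ((S - (cnt + ((sqr-0).toNat:Int))) / sqr + 1) := by ring
          rw [this]
        · rw [if_neg hc, if_neg (by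
            push_cast
            rintro ⟨ha, hb⟩
            exact hc ⟨by omega, by nlinarith [hb, hsq]⟩)]

theorem state_to_r_c_eq (S : Int) (grid : List (List Int)) :
    state_to_r_c S grid = state_to_r_c_alt S grid := by
  unfold state_to_r_c state_to_r_c_alt
  simp only
  rw [PySem.List.pyRange_one, pvAOuter_eq S _ (by positivity)]
  have ht : ((((grid.length : Int)) - 0).toNat : Int) = (grid.length : Int) := by
    simp
  by_cases h : 0 ≤ S ∧ S < (grid.length : Int) * (grid.length : Int)
  · rw [if_pos (by rw [ht]; exact ⟨h.1, by nlinarith [h.2]⟩), if_pos h]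
    have hn : (0:Int) < grid.length := by nlinarith [h.1, h.2]
    rw [PySem.Int.floordiv_eq_ediv_of_pos hn, PySem.Int.mod_eq_emod_of_pos hn]
    simp
  · rw [if_neg (by rw [ht]; rintro ⟨h1, h2⟩; exact h ⟨h1, by nlinarith [h2]⟩), if_neg h]

-- ===== VERDICT (by name: the statement is the Claim_ definition above) =====
theorem state_to_r_c_spec : Claim_equal_state_to_r_c := by
  intro S grid _
  exact state_to_r_c_eq S grid
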